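-- pv_equiv track=rewrite | github.com/maniwaroka/thermalright-trcc-linux-multipleGPU | src/trcc/next/adapters/device/scsi_lcd.py | _frame_chunks
-- ===== SOURCE A (Python) =====
-- from typing import List, Tuple
--
-- _FRAME_CMD_BASE = 0x101F5
--
-- _CHUNK_SIZE_LARGE = 0x10000
--
-- _CHUNK_SIZE_SMALL = 0xE100
--
-- _SMALL_DISPLAY_PIXELS = 76800      # ≤320×240 uses the small chunk size
--
-- def _frame_chunks(width: int, height: int) -> List[Tuple[int, int]]:
--     """Compute (cmd, size) pairs for chunked frame send."""
--     pixels = width * height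
--     chunk_size = (_CHUNK_SIZE_SMALL if pixels <= _SMALL_DISPLAY_PIXELS
--                   else _CHUNK_SIZE_LARGE)
--     total = pixels * 2  # RGB565 = 2 bytes per pixel
--     chunks: List[Tuple[int, int]] = []
--     offset = 0
--     idx = 0
--     while offset < total:
--         size = min(chunk_size, total - offset)
--         cmd = _FRAME_CMD_BASE | (idx << 24)
--         chunks.append((cmd, size))
--         offset += size
--         idx += 1
--     return chunks
-- ===== SOURCE B (Python) =====
-- from typing import List, Tuple
--
-- _FRAME_CMD_BASE = 0x101F5
-- _CHUNK_SIZE_LARGE = 0x10000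
-- _CHUNK_SIZE_SMALL = 0xE100
-- _SMALL_DISPLAY_PIXELS = 76800
--
--
-- def _frame_chunks(width: int, height: int) -> List[Tuple[int, int]]:
--     """Compute (cmd, size) pairs for chunked frame send (closed-form count)."""
--     pixels = width * height
--     chunk_size = (_CHUNK_SIZE_SMALL if pixels <= _SMALL_DISPLAY_PIXELS
--                   else _CHUNK_SIZE_LARGE)
--     total = pixels * 2
--     if total <= 0:
--         return []
--     num_full, remainder = divmod(total, chunk_size)
--     chunks = [(_FRAME_CMD_BASE | (idx << 24), chunk_size)
--               for idx in range(num_full)]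
--     if remainder > 0:
--         chunks.append((_FRAME_CMD_BASE | (num_full << 24), remainder))
--     return chunks
-- ===== Notes on version B (the rewrite author's own statement) =====
-- stated objective: alternative
-- what changed: Replaces the offset-accumulating while loop with a closed-form divmod giving the number of full chunks and the remainder, then one indexed comprehension plus an optional tail chunk.
import Mathlib
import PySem

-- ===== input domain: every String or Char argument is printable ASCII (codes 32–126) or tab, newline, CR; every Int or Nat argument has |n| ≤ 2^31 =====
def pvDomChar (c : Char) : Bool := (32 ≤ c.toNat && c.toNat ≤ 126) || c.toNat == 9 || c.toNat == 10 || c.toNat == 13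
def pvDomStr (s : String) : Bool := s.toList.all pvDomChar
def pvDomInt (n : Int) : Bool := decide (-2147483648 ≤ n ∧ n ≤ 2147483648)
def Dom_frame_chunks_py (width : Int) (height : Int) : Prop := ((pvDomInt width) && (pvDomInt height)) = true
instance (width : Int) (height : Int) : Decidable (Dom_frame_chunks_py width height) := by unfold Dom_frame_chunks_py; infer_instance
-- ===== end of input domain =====

-- B replaces A's offset-accumulating while loop with a divmod closed-form count and one indexed pass (objective: alternative decomposition).

-- ===== PORT A =====
-- the while loop of A; the '0 < chunk_size' guard only makes the recursion total
-- (A always calls it with a positive literal chunk size)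
def pvFrameLoopA (chunk_size total offset idx : Int) : List (Int × Int) :=
  if h : offset < total ∧ 0 < chunk_size then
    let size := min chunk_size (total - offset)
    (PySem.Int.bor 66037 (idx <<< (24 : Nat)), size) :: pvFrameLoopA chunk_size total (offset + size) (idx + 1)
  else []
termination_by (total - offset).toNat
decreasing_by
  have h1 : 0 < min chunk_size (total - offset) := by
    rcases h with ⟨h1, h2⟩; exact lt_min h2 (by omega)
  simp only [Int.lt_iff_add_one_le] at *
  omega

def frame_chunks_py (width : Int) (height : Int) : List (Int × Int) :=
  let pixels := width * height
  let chunk_size : Int := if pixels ≤ 76800 then 57600 else 65536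
  let total := pixels * 2
  pvFrameLoopA chunk_size total 0 0

-- ===== PORT B =====
def frame_chunks_py_alt (width : Int) (height : Int) : List (Int × Int) :=
  let pixels := width * height
  let chunk_size : Int := if pixels ≤ 76800 then 57600 else 65536
  let total := pixels * 2
  if total ≤ 0 then []
  else
    let num_full := PySem.Int.floordiv total chunk_size
    let remainder := PySem.Int.mod total chunk_size
    let chunks := (PySem.List.pyRange 0 num_full 1).map
      (fun idx : Int => (PySem.Int.bor 66037 (idx <<< (24 : Nat)), chunk_size))
    if remainder > 0 then
      chunks ++ [(PySem.Int.bor 66037 (num_full <<< (24 : Nat)), remainder)]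
    else chunks

-- ===== PRECONDITION & SPEC =====
def Spec_frame_chunks_py (width : Int) (height : Int) (out : List (Int × Int)) : Prop := out = frame_chunks_py_alt width height
instance (width : Int) (height : Int) (out : List (Int × Int)) : Decidable (Spec_frame_chunks_py width height out) := by unfold Spec_frame_chunks_py; infer_instance

-- ===== CLAIM (what is proved, stated in full; the proofs are below) =====
def Claim_equal_frame_chunks_py : Prop := ∀ (width : Int) (height : Int), Dom_frame_chunks_py width height → Spec_frame_chunks_py width height (frame_chunks_py width height)

-- ===== LEMMAS AND PROOFS =====

-- A's loop, started at offset = idx*c, is B's map over the remaining full-chunk indices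
-- plus the remainder chunk (present iff the loop still runs and c does not divide total).
theorem pvFrameLoopA_eq (c total idx : Int) (hc : 0 < c) :
    pvFrameLoopA c total (idx * c) idx =
      (PySem.List.pyRange idx (PySem.Int.floordiv total c) 1).map
        (fun i : Int => (PySem.Int.bor 66037 (i <<< (24 : Nat)), c))
      ++ (if idx * c < total ∧ 0 < PySem.Int.mod total c then
            [(PySem.Int.bor 66037 ((PySem.Int.floordiv total c) <<< (24 : Nat)),
              PySem.Int.mod total c)]
          else []) := by
  rw [pvFrameLoopA]
  have hdm := PySem.Int.floordiv_mul_add_mod total c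
  have hm0 : 0 ≤ PySem.Int.mod total c := PySem.Int.mod_nonneg total hc
  have hmlt : PySem.Int.mod total c < c := PySem.Int.mod_lt total hc
  by_cases hlt : idx * c < total
  · rw [dif_pos ⟨hlt, hc⟩]
    by_cases hfull : c ≤ total - idx * c
    · -- full chunk
      have hsz : min c (total - idx * c) = c := min_eq_left hfull
      have hidxq : idx < PySem.Int.floordiv total c := by nlinarith
      simp only [hsz]
      have hstep : idx * c + c = (idx + 1) * c := by ring
      rw [hstep, pvFrameLoopA_eq c total (idx + 1) hc,
          PySem.List.pyRange_one_cons hidxq, List.map_cons, List.cons_append]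
      congr 2
      by_cases hm : 0 < PySem.Int.mod total c
      · have h2 : (idx + 1) * c < total := by nlinarith
        rw [if_pos ⟨h2, hm⟩, if_pos ⟨hlt, hm⟩]
      · rw [if_neg (by tauto), if_neg (by tauto)]
    · -- last, partial chunk
      have hrem : total - idx * c < c := by omega
      have hsz : min c (total - idx * c) = total - idx * c := min_eq_right (le_of_lt hrem)
      have hq : PySem.Int.floordiv total c = idx := by nlinarith
      have hm : PySem.Int.mod total c = total - idx * c := by
        rw [hq] at hdm; omega
      simp only [hsz, hq]
      have hnext : pvFrameLoopA c total (idx * c + (total - idx * c)) (idx + 1) = [] := by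
        rw [pvFrameLoopA, dif_neg (by omega)]
      rw [hnext]
      have hrange : PySem.List.pyRange idx idx 1 = [] := by
        rw [PySem.List.pyRange_one]
        rw [show (idx - idx).toNat = 0 by omega]
        rfl
      rw [hrange, hm, if_pos ⟨hlt, by omega⟩]
      rfl
  · -- loop does not run
    rw [dif_neg (by tauto)]
    have hq : PySem.Int.floordiv total c ≤ idx := by nlinarith
    have hrange : PySem.List.pyRange idx (PySem.Int.floordiv total c) 1 = [] := by
      rw [PySem.List.pyRange_one]
      rw [show (PySem.Int.floordiv total c - idx).toNat = 0 by omega]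
      rfl
    rw [hrange, if_neg (by tauto)]
    rfl
termination_by (total - idx * c).toNat
decreasing_by
  simp only [Int.lt_iff_add_one_le] at *
  omega

-- ===== VERDICT (by name: the statement is the Claim_ definition above) =====
theorem frame_chunks_py_spec : Claim_equal_frame_chunks_py := by
  intro width height _
  unfold Spec_frame_chunks_py frame_chunks_py frame_chunks_py_alt
  set pixels := width * height with hp
  set c : Int := if pixels ≤ 76800 then 57600 else 65536 with hcdef
  have hc : 0 < c := by rw [hcdef]; split <;> norm_num
  set total := pixels * 2 with ht
  by_cases h0 : total ≤ 0
  · rw [pvFrameLoopA, dif_neg (by omega), if_pos h0]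
  · rw [if_neg h0]
    have hmain := pvFrameLoopA_eq c total 0 hc
    rw [zero_mul] at hmain
    rw [hmain]
    by_cases hm : 0 < PySem.Int.mod total c
    · rw [if_pos ⟨by omega, hm⟩, if_pos hm]
    · rw [if_neg (by tauto), if_neg hm, List.append_nil]
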